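-- pv_equiv track=rewrite | github.com/fhinsley/AI_news_reel | scripts/build_video.py | wrap_sources
-- ===== SOURCE A (Python) =====
-- def wrap_sources(sources_text, max_line_length=40):
--     items = [s.strip() for s in sources_text.split(",")]
--     lines = []
--     current_line = ""
--
--     for item in items:
--         test_line = current_line + ", " + item if current_line else item
--         if len(test_line) > max_line_length and current_line:
--             lines.append(current_line + ",")
--             current_line = item
--         else:
--             current_line = test_line
--
--     if current_line:
--         lines.append(current_line)
--
--     return "\n".join(lines)
-- ===== SOURCE B (Python) =====
-- def wrap_sources(sources_text, max_line_length=40):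
--     items = [s.strip() for s in sources_text.split(",")]
--     n = len(items)
--     lines = []
--     i = 0
--     while i < n:
--         if not items[i]:
--             i += 1          # no line is open: empty items are dropped
--             continue
--         # maximal prefix starting at i that fits, found by summing widths
--         width = len(items[i])
--         j = i + 1
--         while j < n and width + 2 + len(items[j]) <= max_line_length:
--             width += 2 + len(items[j])
--             j += 1
--         line = ", ".join(items[i:j])
--         lines.append(line if j == n else line + ",")
--         i = j
--     return "\n".join(lines)
-- ===== Notes on version B (the rewrite author's own statement) =====
-- stated objective: alternative
-- what changed: B builds each output line at once: it finds the maximal fitting run of items by summing item widths (an inner scan over indices), renders that run with a single join and jumps past it, instead of A's item-by-item state machine that grows current_line by string concatenation and flushes it on overflow.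
import Mathlib
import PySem

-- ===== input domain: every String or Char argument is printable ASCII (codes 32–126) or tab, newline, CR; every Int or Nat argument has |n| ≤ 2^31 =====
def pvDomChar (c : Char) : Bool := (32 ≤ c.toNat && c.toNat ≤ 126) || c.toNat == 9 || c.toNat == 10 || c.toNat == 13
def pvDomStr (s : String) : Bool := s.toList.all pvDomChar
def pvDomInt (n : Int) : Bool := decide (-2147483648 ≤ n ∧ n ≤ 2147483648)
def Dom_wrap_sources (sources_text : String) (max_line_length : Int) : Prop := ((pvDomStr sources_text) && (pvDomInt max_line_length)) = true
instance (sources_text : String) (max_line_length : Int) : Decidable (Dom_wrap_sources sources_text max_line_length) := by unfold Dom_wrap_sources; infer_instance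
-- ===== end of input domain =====

-- B builds each output line at once: it finds the maximal fitting run of items by summing
-- item widths, renders the run with a single join and jumps past it, instead of A's
-- item-by-item state machine that grows current_line by concatenation (alternative
-- decomposition, same cost).

-- items = [s.strip() for s in sources_text.split(",")]  (identical first line of A and B)
def pvItems (t : String) : List String :=
  ((PySem.Str.split? t ",").getD []).map (fun s => PySem.Str.strip s)

-- ===== PORT A =====
-- A's for-loop, as structural recursion over the item list with state (lines, current_line)
def wrapA_loop (items : List String) (m : Int) (lines : List String) (current : String) : List String × String :=
  match items with
  | [] => (lines, current)
  | item :: rest =>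
    let test := if current ≠ "" then current ++ ", " ++ item else item
    if PySem.Str.len test > m ∧ current ≠ "" then
      wrapA_loop rest m (lines ++ [current ++ ","]) item
    else
      wrapA_loop rest m lines test

def wrap_sources (sources_text : String) (max_line_length : Int) : String :=
  let p := wrapA_loop (pvItems sources_text) max_line_length [] ""
  PySem.Str.join "\n" (if p.2 ≠ "" then p.1 ++ [p.2] else p.1)

-- ===== PORT B =====
-- B's inner while loop: extend the run while the summed width stays within the limit;
-- returns (items added to the run, remaining items)
def wrapB_fit (rest : List String) (m w : Int) : List String × List String :=
  match rest with
  | [] => ([], [])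
  | x :: r =>
    if w + 2 + PySem.Str.len x ≤ m then
      let p := wrapB_fit r m (w + 2 + PySem.Str.len x)
      (x :: p.1, p.2)
    else ([], x :: r)

-- needed by wrapB_lines's termination proof (cited in decreasing_by)
lemma wrapB_fit_len_le : ∀ (rest : List String) (m w : Int), (wrapB_fit rest m w).2.length ≤ rest.length := by
  intro rest
  induction rest with
  | nil => intro m w; simp [wrapB_fit]
  | cons x r ih =>
    intro m w
    rw [wrapB_fit]
    split
    · simpa using Nat.le_succ_of_le (ih m (w + 2 + PySem.Str.len x))
    · simp

-- B's outer while loop: skip empty items while no line is open, otherwise take the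
-- maximal fitting run, render it with one join, and continue after it
def wrapB_lines (items : List String) (m : Int) : List String :=
  match items with
  | [] => []
  | item :: rest =>
    if item = "" then wrapB_lines rest m
    else
      match h : wrapB_fit rest m (PySem.Str.len item) with
      | (ext, rem) =>
        let line := PySem.Str.join ", " (item :: ext)
        if rem = [] then [line] else (line ++ ",") :: wrapB_lines rem m
termination_by items.length
decreasing_by
  · simp
  · have := wrapB_fit_len_le rest m (PySem.Str.len item)
    rw [h] at this
    simp at this ⊢
    omega

def wrap_sources_alt (sources_text : String) (max_line_length : Int) : String :=
  PySem.Str.join "\n" (wrapB_lines (pvItems sources_text) max_line_length)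

-- ===== PRECONDITION & SPEC =====
def Spec_wrap_sources (sources_text : String) (max_line_length : Int) (out : String) : Prop := out = wrap_sources_alt sources_text max_line_length
instance (sources_text : String) (max_line_length : Int) (out : String) : Decidable (Spec_wrap_sources sources_text max_line_length out) := by unfold Spec_wrap_sources; infer_instance

-- ===== CLAIM (what is proved, stated in full; the proofs are below) =====
def Claim_equal_wrap_sources : Prop := ∀ (sources_text : String) (max_line_length : Int), Dom_wrap_sources sources_text max_line_length → Spec_wrap_sources sources_text max_line_length (wrap_sources sources_text max_line_length)

-- ===== LEMMAS AND PROOFS =====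

-- rendering a run: join its items with ", "
def pvJ (g : List String) : String := PySem.Str.join ", " g

-- A's post-loop flush
def finalA (p : List String × String) : List String := if p.2 ≠ "" then p.1 ++ [p.2] else p.1

-- what B produces once a line is open with run g
def wrapBopen (items : List String) (m : Int) (g : List String) : List String :=
  match wrapB_fit items m (PySem.Str.len (pvJ g)) with
  | (ext, rem) =>
    if rem = [] then [pvJ (g ++ ext)] else (pvJ (g ++ ext) ++ ",") :: wrapB_lines rem m

lemma pvJ_singleton (x : String) : pvJ [x] = x := by
  apply String.toList_inj.mp
  simp [pvJ, PySem.Str.toList_join, PySem.Chars.join_singleton]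

lemma chars_join_append_singleton (sep : List Char) (g : List (List Char)) (x : List Char) (h : g ≠ []) :
    PySem.Chars.join sep (g ++ [x]) = PySem.Chars.join sep g ++ sep ++ x := by
  induction g with
  | nil => simp at h
  | cons a rest ih =>
    cases rest with
    | nil => simp [PySem.Chars.join_cons_cons, PySem.Chars.join_singleton]
    | cons b rest' =>
      have := ih (by simp)
      simp only [List.cons_append, PySem.Chars.join_cons_cons] at this ⊢
      rw [this]; simp [List.append_assoc]

lemma pvJ_append_singleton (g : List String) (x : String) (h : g ≠ []) :
    pvJ (g ++ [x]) = pvJ g ++ ", " ++ x := by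
  apply String.toList_inj.mp
  simp only [pvJ, PySem.Str.toList_join, List.map_append, List.map_cons, List.map_nil,
    String.toList_append]
  exact chars_join_append_singleton _ _ _ (by simpa using h)

lemma str_ne_empty_iff (s : String) : s ≠ "" ↔ s.toList ≠ [] := by
  constructor
  · intro h hc; exact h (String.toList_inj.mp (by simpa using hc))
  · intro h hc; exact h (by simp [hc])

-- opening a line at a nonempty item x: B's line is the run [x] extended by the fit
lemma wrapBopen_singleton (x : String) (hx : x ≠ "") (rest : List String) (m : Int) :
    wrapB_lines (x :: rest) m = wrapBopen rest m [x] := by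
  rw [wrapB_lines]
  simp only [hx, wrapBopen, pvJ_singleton]
  rfl

-- main invariant: A's loop from the fresh state produces B's lines, and from an
-- open line (current_line = pvJ g) produces B's open-line continuation
lemma mainAB : ∀ (N : ℕ) (items : List String) (m : Int), items.length ≤ N →
    (∀ L, finalA (wrapA_loop items m L "") = L ++ wrapB_lines items m) ∧
    (∀ g L, g ≠ [] → pvJ g ≠ "" →
      finalA (wrapA_loop items m L (pvJ g)) = L ++ wrapBopen items m g) := by
  intro N
  induction N with
  | zero =>
    intro items m h
    have hi : items = [] := List.length_eq_zero_iff.mp (Nat.le_zero.mp h)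
    subst hi
    constructor
    · intro L; simp [wrapA_loop, wrapB_lines, finalA]
    · intro g L _ hne; simp [wrapA_loop, finalA, hne, wrapBopen, wrapB_fit]
  | succ N ih =>
    intro items m h
    cases items with
    | nil =>
      constructor
      · intro L; simp [wrapA_loop, wrapB_lines, finalA]
      · intro g L _ hne; simp [wrapA_loop, finalA, hne, wrapBopen, wrapB_fit]
    | cons x rest =>
      have hr : rest.length ≤ N := by simpa using h
      constructor
      · intro L
        have hstep : wrapA_loop (x :: rest) m L "" = wrapA_loop rest m L x := by
          simp [wrapA_loop]
        by_cases hx : x = ""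
        · subst hx
          have hfresh := (ih rest m hr).1 L
          rw [hstep, hfresh, wrapB_lines]
          simp
        · have hopen := (ih rest m hr).2 [x] L (by simp) (by rw [pvJ_singleton]; exact hx)
          rw [pvJ_singleton] at hopen
          rw [hstep, wrapBopen_singleton x hx rest m, hopen]
      · intro g L hg hne
        have hlenTest : PySem.Str.len (pvJ g ++ ", " ++ x)
            = PySem.Str.len (pvJ g) + 2 + PySem.Str.len x := by
          simp [PySem.Str.len_eq]; omega
        by_cases hfit : PySem.Str.len (pvJ g) + 2 + PySem.Str.len x ≤ m
        · -- the item fits: A extends current_line, B extends the run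
          have hJ : pvJ (g ++ [x]) = pvJ g ++ ", " ++ x := pvJ_append_singleton g x hg
          have hne' : pvJ (g ++ [x]) ≠ "" := by rw [hJ, str_ne_empty_iff]; simp
          have hlen' : PySem.Str.len (pvJ (g ++ [x])) = PySem.Str.len (pvJ g) + 2 + PySem.Str.len x := by
            rw [hJ]; exact hlenTest
          have hnc : ¬ (PySem.Str.len (pvJ g ++ ", " ++ x) > m ∧ pvJ g ≠ "") := by
            rw [hlenTest]; intro hc; omega
          have hstep : wrapA_loop (x :: rest) m L (pvJ g) = wrapA_loop rest m L (pvJ (g ++ [x])) := by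
            simp only [wrapA_loop]
            rw [if_pos hne, if_neg hnc, hJ]
          have hR : wrapBopen (x :: rest) m g = wrapBopen rest m (g ++ [x]) := by
            unfold wrapBopen
            rw [hlen']
            cases hq : wrapB_fit rest m (PySem.Str.len (pvJ g) + 2 + PySem.Str.len x) with
            | mk ext rem =>
              rw [wrapB_fit, if_pos hfit, hq]
              have hgx : g ++ x :: ext = (g ++ [x]) ++ ext := by simp
              simp only [hgx]
          have hopen := (ih rest m hr).2 (g ++ [x]) L (by simp) hne'
          rw [hstep, hR, hopen]
        · -- overflow: A flushes current_line with a trailing comma, B closes the run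
          have hcond : PySem.Str.len (pvJ g ++ ", " ++ x) > m ∧ pvJ g ≠ "" :=
            ⟨by rw [hlenTest]; omega, hne⟩
          have hstep : wrapA_loop (x :: rest) m L (pvJ g)
              = wrapA_loop rest m (L ++ [pvJ g ++ ","]) x := by
            simp only [wrapA_loop]
            rw [if_pos hne, if_pos hcond]
          have hR : wrapBopen (x :: rest) m g = (pvJ g ++ ",") :: wrapB_lines (x :: rest) m := by
            unfold wrapBopen
            rw [wrapB_fit, if_neg hfit]
            simp
          rw [hstep, hR]
          by_cases hx : x = ""
          · subst hx
            have hfresh := (ih rest m hr).1 (L ++ [pvJ g ++ ","])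
            rw [hfresh, wrapB_lines]
            simp
          · have hopen := (ih rest m hr).2 [x] (L ++ [pvJ g ++ ","]) (by simp)
              (by rw [pvJ_singleton]; exact hx)
            rw [pvJ_singleton] at hopen
            rw [hopen, wrapBopen_singleton x hx rest m]
            simp

-- ===== VERDICT (by name: the statement is the Claim_ definition above) =====
theorem wrap_sources_spec : Claim_equal_wrap_sources := by
  intro t m _
  show wrap_sources t m = wrap_sources_alt t m
  have h := (mainAB (pvItems t).length (pvItems t) m le_rfl).1 []
  simp only [finalA, List.nil_append] at h
  unfold wrap_sources wrap_sources_alt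
  dsimp only
  rw [h]
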